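-- pv_equiv track=rewrite | github.com/rajendrapandey95/HackerEarth | 2024/January/7-1-24.py | solve
-- ===== SOURCE A (Python) =====
-- import math
--
-- def bit(x):
--     ans = 0
--     while x:
--         x //= 2
--         ans += 1
--     return ans
--
-- def check(d, x):
--     if bit(x // d) <= bit(d):
--         return True
--     return False
--
-- def solve(x):
--     l, r = 1, int(math.sqrt(x))
--     while l < r:
--         m = (l + r) // 2
--         if check(m, x):
--             r = m
--         else:
--             l = m + 1
--     if not check(l, x):
--         return l + 1
--     else:
--         return l
-- ===== SOURCE B (Python) =====
-- import math
--
-- def solve(x):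
--     r = int(math.sqrt(x))
--     for d in range(1, r + 1):
--         if ((x // d).bit_length()) <= d.bit_length():
--             return d
--     return r + 1
-- ===== Notes on version B (the rewrite author's own statement) =====
-- stated objective: simpler
-- what changed: Replaces the hand-written binary search (with its post-loop fallback check) and the manual bit-counting loop by a direct linear scan over d = 1..isqrt(x) returning the first d with (x//d).bit_length() <= d.bit_length(), relying on monotonicity of the condition; falls back to isqrt(x)+1.
import Mathlib
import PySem

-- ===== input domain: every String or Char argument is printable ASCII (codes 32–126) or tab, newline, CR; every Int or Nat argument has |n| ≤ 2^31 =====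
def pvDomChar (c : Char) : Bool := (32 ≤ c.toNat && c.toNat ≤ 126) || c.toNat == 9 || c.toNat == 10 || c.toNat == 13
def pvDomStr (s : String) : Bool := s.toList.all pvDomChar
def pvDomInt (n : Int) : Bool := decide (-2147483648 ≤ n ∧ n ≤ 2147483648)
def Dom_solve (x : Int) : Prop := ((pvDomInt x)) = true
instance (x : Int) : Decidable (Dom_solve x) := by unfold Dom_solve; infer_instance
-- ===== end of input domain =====

-- B replaces A's binary search and hand-written bit loop by a linear scan over d = 1..isqrt(x)
-- using int.bit_length(); objective: simpler.

-- ===== PORT A =====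
-- A's 'bit' while-loop; its argument is always nonnegative (x // d with x ≥ 0, d ≥ 1),
-- so the recursion runs on x.toNat, where n // 2 = n / 2 exactly.
def bitAux (n : Nat) (ans : Int) : Int :=
  if n = 0 then ans else bitAux (n / 2) (ans + 1)

def bitA (x : Int) : Int := bitAux x.toNat 0

def checkA (d x : Int) : Bool :=
  if bitA (PySem.Int.floordiv x d) ≤ bitA d then true else false

-- the 'while l < r' binary-search loop of A; returns the final l (= r)
def solveLoop (x l r : Int) : Int :=
  if h : l < r then
    let m := PySem.Int.floordiv (l + r) 2
    if checkA m x then solveLoop x l m else solveLoop x (m + 1) r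
  else l
termination_by (r - l).toNat
decreasing_by
  · have hm : PySem.Int.floordiv (l + r) 2 < r :=
      (PySem.Int.floordiv_lt_iff_lt_mul (by norm_num)).mpr (by omega)
    omega
  · have hb := PySem.Int.floordiv_two_mid_bounds (le_of_lt h)
    omega

-- int(math.sqrt(x)) is exactly Nat.sqrt on the admitted domain 0 ≤ x ≤ 2^31
-- (double sqrt is correctly rounded and x < 2^52, so int(math.sqrt(x)) = isqrt(x)).
def solve (x : Int) : Int :=
  let r : Int := (Nat.sqrt x.toNat : Int)
  let l := solveLoop x 1 r
  if !(checkA l x) then l + 1 else l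

-- ===== PORT B =====
def checkB (d x : Int) : Bool :=
  PySem.Int.bitLength (PySem.Int.floordiv x d) ≤ PySem.Int.bitLength d

def solve_alt (x : Int) : Int :=
  let r : Int := (Nat.sqrt x.toNat : Int)
  match (PySem.List.pyRange 1 (r + 1) 1).find? (fun d => checkB d x) with
  | some d => d
  | none => r + 1

-- ===== PRECONDITION & SPEC =====
-- math.sqrt raises ValueError on negative input, so A (and B) raise for x < 0.
def Pre_solve (x : Int) : Prop := 0 ≤ x
instance (x : Int) : Decidable (Pre_solve x) := by unfold Pre_solve; infer_instance
def pvWitness_solve : Int := 5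

def Spec_solve (x : Int) (out : Int) : Prop := out = solve_alt x
instance (x : Int) (out : Int) : Decidable (Spec_solve x out) := by unfold Spec_solve; infer_instance

-- ===== CLAIM (what is proved, stated in full; the proofs are below) =====
def Claim_equal_solve : Prop := ∀ (x : Int), Dom_solve x → Pre_solve x → Spec_solve x (solve x)

-- ===== LEMMAS AND PROOFS =====

theorem solveLoop_step (x l r : Int) (h : l < r) :
    solveLoop x l r = if checkA (PySem.Int.floordiv (l + r) 2) x
      then solveLoop x l (PySem.Int.floordiv (l + r) 2)
      else solveLoop x (PySem.Int.floordiv (l + r) 2 + 1) r := by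
  rw [solveLoop, dif_pos h]

theorem solveLoop_stop (x l r : Int) (h : ¬ l < r) : solveLoop x l r = l := by
  rw [solveLoop, dif_neg h]

-- A's bit loop computes bit_length
theorem bitAux_eq (n : Nat) : ∀ ans : Int, bitAux n ans = ans + (PySem.Int.bitLength (n : Int) : Int) := by
  induction n using Nat.strong_induction_on with
  | _ n ih =>
    intro ans
    unfold bitAux
    by_cases h : n = 0
    · simp [h, PySem.Int.bitLength_zero]
    · have hpos : 0 < n := Nat.pos_of_ne_zero h
      rw [if_neg h, ih (n / 2) (Nat.div_lt_self hpos (by norm_num)),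
          PySem.Int.bitLength_natCast hpos]
      push_cast; ring

theorem bitA_eq (y : Int) (hy : 0 ≤ y) : bitA y = (PySem.Int.bitLength y : Int) := by
  rw [bitA, bitAux_eq, Int.toNat_of_nonneg hy]; ring

theorem floordiv_nonneg' (x d : Int) (hx : 0 ≤ x) (hd : 0 < d) : 0 ≤ PySem.Int.floordiv x d := by
  rw [PySem.Int.floordiv_eq_ediv_of_pos hd]
  exact Int.ediv_nonneg hx (le_of_lt hd)

theorem checkA_eq_checkB (d x : Int) (hx : 0 ≤ x) (hd : 1 ≤ d) : checkA d x = checkB d x := by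
  rw [checkA, checkB, bitA_eq _ (floordiv_nonneg' x d hx (by omega)), bitA_eq _ (by omega)]
  by_cases h : PySem.Int.bitLength (PySem.Int.floordiv x d) ≤ PySem.Int.bitLength d
  · simp [h]
  · simp [h, Nat.cast_le.not.mpr h]

-- bit_length is monotone on Nat casts
theorem bitLength_mono (n : Nat) : ∀ m : Nat, m ≤ n →
    PySem.Int.bitLength (m : Int) ≤ PySem.Int.bitLength (n : Int) := by
  induction n using Nat.strong_induction_on with
  | _ n ih =>
    intro m hmn
    by_cases hm : m = 0
    · simp [hm, PySem.Int.bitLength_zero]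
    · have hmpos : 0 < m := Nat.pos_of_ne_zero hm
      have hnpos : 0 < n := lt_of_lt_of_le hmpos hmn
      rw [PySem.Int.bitLength_natCast hmpos, PySem.Int.bitLength_natCast hnpos]
      have := ih (n / 2) (Nat.div_lt_self hnpos (by norm_num)) (m / 2) (Nat.div_le_div_right hmn)
      omega

-- the scan predicate is monotone in d
theorem checkB_mono (x d d' : Int) (hx : 0 ≤ x) (hd : 1 ≤ d) (hdd : d ≤ d')
    (h : checkB d x = true) : checkB d' x = true := by
  obtain ⟨a, rfl⟩ := Int.eq_ofNat_of_zero_le hx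
  obtain ⟨b, rfl⟩ := Int.eq_ofNat_of_zero_le (by omega : (0:Int) ≤ d)
  obtain ⟨c, rfl⟩ := Int.eq_ofNat_of_zero_le (by omega : (0:Int) ≤ d')
  have hb : 0 < b := by exact_mod_cast hd
  have hbc : b ≤ c := by exact_mod_cast hdd
  rw [checkB, PySem.Int.floordiv_natCast, decide_eq_true_iff] at h ⊢
  have h1 : PySem.Int.bitLength ((a / c : Nat) : Int) ≤ PySem.Int.bitLength ((a / b : Nat) : Int) :=
    bitLength_mono _ _ (Nat.div_le_div_left hbc hb)
  have h2 : PySem.Int.bitLength ((b : Nat) : Int) ≤ PySem.Int.bitLength ((c : Nat) : Int) :=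
    bitLength_mono _ _ hbc
  omega

-- when check fails at r, the binary search runs all the way up to r
theorem loopFalse (x r : Int) (hx : 0 ≤ x) (hPr : checkB r x = false) :
    ∀ n : Nat, ∀ l : Int, (r - l).toNat ≤ n → 1 ≤ l → l ≤ r → solveLoop x l r = r := by
  intro n
  induction n with
  | zero =>
    intro l hn h1 hlr
    rw [solveLoop_stop x l r (by omega)]; omega
  | succ n ih =>
    intro l hn h1 hlr
    by_cases h : l < r
    · rw [solveLoop_step x l r h]
      have hb := PySem.Int.floordiv_two_mid_bounds (le_of_lt h)
      have hm : PySem.Int.floordiv (l + r) 2 < r :=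
        (PySem.Int.floordiv_lt_iff_lt_mul (by norm_num)).mpr (by omega)
      set m := PySem.Int.floordiv (l + r) 2 with hmdef
      have hPm : checkA m x = false := by
        rw [checkA_eq_checkB m x hx (by omega)]
        by_cases hc : checkB m x = true
        · exact absurd (checkB_mono x m r hx (by omega) (by omega) hc) (by simp [hPr])
        · simpa using hc
      rw [if_neg (by simp [hPm])]
      exact ih (m + 1) (by omega) (by omega) (by omega)
    · rw [solveLoop_stop x l r h]; omega

-- when check holds at r, the binary search finds exactly the first d in [l, r] with checkB
theorem loopTrue (x : Int) (hx : 0 ≤ x) :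
    ∀ n : Nat, ∀ l r : Int, (r - l).toNat ≤ n → 1 ≤ l → l ≤ r → checkB r x = true →
      (PySem.List.pyRange l (r + 1) 1).find? (fun d => checkB d x) = some (solveLoop x l r) := by
  intro n
  induction n with
  | zero =>
    intro l r hn h1 hlr hPr
    have hlr' : l = r := by omega
    subst hlr'
    rw [solveLoop_stop x l l (lt_irrefl l), PySem.List.pyRange_one_singleton]
    simp [List.find?, hPr]
  | succ n ih =>
    intro l r hn h1 hlr hPr
    by_cases h : l < r
    · rw [solveLoop_step x l r h]
      have hb := PySem.Int.floordiv_two_mid_bounds (le_of_lt h)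
      have hm : PySem.Int.floordiv (l + r) 2 < r :=
        (PySem.Int.floordiv_lt_iff_lt_mul (by norm_num)).mpr (by omega)
      set m := PySem.Int.floordiv (l + r) 2 with hmdef
      have hsplit : PySem.List.pyRange l (r + 1) 1 =
          PySem.List.pyRange l (m + 1) 1 ++ PySem.List.pyRange (m + 1) (r + 1) 1 :=
        PySem.List.pyRange_one_append l (m + 1) (r + 1) (by omega) (by omega)
      rw [checkA_eq_checkB m x hx (by omega)]
      by_cases hc : checkB m x = true
      · rw [if_pos hc]
        have hfst := ih l m (by omega) h1 (by omega) hc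
        rw [hsplit, List.find?_append, hfst, Option.some_or]
      · rw [if_neg (by simp [hc])]
        have hnone : (PySem.List.pyRange l (m + 1) 1).find? (fun d => checkB d x) = none := by
          rw [List.find?_eq_none]
          intro e he
          rw [PySem.List.mem_pyRange_one] at he
          by_cases hce : checkB e x = true
          · exact absurd (checkB_mono x e m hx (by omega) (by omega) hce) (by simp [hc])
          · simpa using hce
        rw [hsplit, List.find?_append, hnone, Option.none_or]
        exact ih (m + 1) r (by omega) (by omega) (by omega) hPr
    · have hlr' : l = r := by omega
      subst hlr'
      rw [solveLoop_stop x l l (lt_irrefl l), PySem.List.pyRange_one_singleton]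
      simp [List.find?, hPr]

-- ===== VERDICT (by name: the statement is the Claim_ definition above) =====
theorem solve_spec : Claim_equal_solve := by
  intro x _ hpre
  have hx : 0 ≤ x := hpre
  unfold Spec_solve
  simp only [solve, solve_alt]
  set r : Int := (Nat.sqrt x.toNat : Int) with hrdef
  by_cases hr : 1 ≤ r
  · by_cases hP : checkB r x = true
    · -- a first true d exists; both sides return it
      have hfind := loopTrue x hx (r - 1).toNat 1 r (by omega) (by omega) hr hP
      set L := solveLoop x 1 r with hLdef
      have hPL : checkB L x = true := by
        have := List.find?_some hfind; simpa using this
      have hLmem : L ∈ PySem.List.pyRange 1 (r + 1) 1 := List.mem_of_find?_eq_some hfind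
      rw [PySem.List.mem_pyRange_one] at hLmem
      rw [hfind, checkA_eq_checkB L x hx (by omega), hPL]
      simp
    · -- no d works; both sides return r + 1
      have hPf : checkB r x = false := by simpa using hP
      have hloop := loopFalse x r hx hPf (r - 1).toNat 1 (by omega) (by omega) hr
      have hnone : (PySem.List.pyRange 1 (r + 1) 1).find? (fun d => checkB d x) = none := by
        rw [List.find?_eq_none]
        intro e he
        rw [PySem.List.mem_pyRange_one] at he
        by_cases hce : checkB e x = true
        · exact absurd (checkB_mono x e r hx (by omega) (by omega) hce) (by simp [hPf])
        · simpa using hce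
      rw [hloop, hnone, checkA_eq_checkB r x hx (by omega), hPf]
      simp
  · -- r = 0, hence x = 0: both sides return 1
    have hr0 : r = 0 := by
      have : (0:Int) ≤ r := by rw [hrdef]; exact Int.natCast_nonneg _
      omega
    have hx0 : x = 0 := by
      have hs : Nat.sqrt x.toNat = 0 := by omega
      have := Nat.sqrt_eq_zero.mp hs
      omega
    subst hx0
    rw [hr0, solveLoop_stop 0 1 0 (by omega), checkA_eq_checkB 1 0 (by omega) (by omega),
        show PySem.List.pyRange 1 (0 + 1) 1 = [] from PySem.List.pyRange_one_eq_nil (by omega)]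
    decide
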